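-- pv_equiv track=rewrite | github.com/FireLegend03/LA2 | Pesquisa exaustiva/União.py | uniao
-- ===== SOURCE A (Python) =====
-- def valido(lista, set):
--     for i in lista:
--         if i == set:
--             return False
--     return True
--
-- def prox(sets, numeros, lista):
--     tamanho_lista = 0
--     for set in lista:
--         tamanho_lista += len(set)
--     if tamanho_lista == len(numeros):
--         return True
--
--     for set in sets:
--         if valido(lista, set):
--             lista.append(set)
--             if prox(sets, numeros, lista):
--                 return True
--             lista.pop()
--     return False
--
--
--
--     return False
--
-- def uniao(sets):
--     if len(sets) == 0:
--         return 0
--     numeros = []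
--     for i in sets:
--         for d in i:
--             if d not in numeros:
--                 numeros.append(d)
--     n = len(sets)
--
--     for set in sets:
--         lista = []
--         lista.append(set)
--         if prox(sets, numeros, lista):
--             c = len(lista)
--             if c < n:
--                 n = c
--
--     return n
-- ===== SOURCE B (Python) =====
-- def uniao(sets):
--     # Iterative DFS with an explicit stack (no recursion, no list mutation);
--     # target = number of distinct elements, computed via a set in one pass.
--     if not sets:
--         return 0
--     seen = set()
--     for i in sets:
--         seen.update(i)
--     target = len(seen)
--     n = len(sets)
--     for s in sets:
--         stack = [([s], len(s))]
--         while stack: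
--             path, tot = stack.pop()
--             if tot == target:
--                 if len(path) < n:
--                     n = len(path)
--                 break
--             for t in reversed(sets):
--                 if t not in path:
--                     stack.append((path + [t], tot + len(t)))
--     return n
-- ===== Notes on version B (the rewrite author's own statement) =====
-- stated objective: alternative
-- what changed: Replaced A's recursive, list-mutating backtracking DFS (prox appending/popping on a shared list) by an iterative DFS over an explicit stack of (path, size-sum) pairs, with the distinct-element target computed via a set instead of a membership-scan append loop.
import Mathlib
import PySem

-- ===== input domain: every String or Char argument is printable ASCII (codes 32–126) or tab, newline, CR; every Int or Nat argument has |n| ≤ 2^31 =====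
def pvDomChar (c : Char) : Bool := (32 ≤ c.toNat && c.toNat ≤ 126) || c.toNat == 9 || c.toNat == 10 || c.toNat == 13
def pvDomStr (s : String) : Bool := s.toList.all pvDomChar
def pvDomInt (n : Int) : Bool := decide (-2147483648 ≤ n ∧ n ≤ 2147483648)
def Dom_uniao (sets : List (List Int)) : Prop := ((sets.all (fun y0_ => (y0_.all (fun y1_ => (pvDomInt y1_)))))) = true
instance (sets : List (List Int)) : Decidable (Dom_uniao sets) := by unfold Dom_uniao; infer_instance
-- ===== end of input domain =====

-- B replaces A's recursive, list-mutating DFS by an iterative DFS with an explicit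
-- stack (and a set for the distinct-element count); same first-found result, no recursion.
-- (A mutates no argument visible to the caller; equivalence is about the return value.)

-- ===== PORT A =====
-- 'tamanho_lista = 0; for set in lista: tamanho_lista += len(set)'
def tamanho (lista : List (List Int)) : Int :=
  lista.foldl (fun t s => t + (s.length : Int)) 0

def valido : List (List Int) → List Int → Bool
  | [], _ => true
  | i :: rest, s => if i = s then false else valido rest s

-- the 'for set in sets' loop of prox; `k` is the recursive call 'prox(sets, numeros, lista+[set])'
def proxGo (k : List (List Int) → Option (List (List Int))) (lista : List (List Int)) :
    List (List Int) → Option (List (List Int))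
  | [] => none
  | s :: rest =>
    if valido lista s then
      match k (lista ++ [s]) with
      | some r => some r
      | none => proxGo k lista rest
    else proxGo k lista rest

-- prox returns the final (mutated) `lista` on success, none on failure.
-- fuel is only a structural-recursion guard; uniao supplies enough for it never to run out.
def prox (sets : List (List Int)) (numeros : List Int) : Nat → List (List Int) → Option (List (List Int))
  | 0, _ => none
  | fuel + 1, lista =>
    if tamanho lista = (numeros.length : Int) then some lista
    else proxGo (prox sets numeros fuel) lista sets

-- 'numeros = []; for i in sets: for d in i: if d not in numeros: numeros.append(d)'
def uniaoNums (sets : List (List Int)) : List Int :=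
  sets.foldl
    (fun numeros i =>
      i.foldl (fun numeros d => if d ∈ numeros then numeros else numeros ++ [d]) numeros)
    []

def uniao (sets : List (List Int)) : Int :=
  if sets.length = 0 then 0
  else
    let numeros := uniaoNums sets
    sets.foldl
      (fun n s =>
        match prox sets numeros (sets.length + 1) [s] with
        | some lista => if (lista.length : Int) < n then (lista.length : Int) else n
        | none => n)
      (sets.length : Int)

-- ===== PORT B =====
-- 'seen = set(); for i in sets: seen.update(i)'
def uniaoSeen (sets : List (List Int)) : PySem.Set Int :=
  sets.foldl (fun seen i => PySem.Set.update seen i) PySem.Set.empty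

-- the 'while stack:' loop; head of the list is the top of the stack, so Python's
-- reversed-order appends become an in-order prepend of the valid children.
-- fuel is only a structural-recursion guard; uniao_alt supplies enough for it never to run out.
def loopB (sets : List (List Int)) (target : Int) :
    Nat → List (List (List Int) × Int) → Option Int
  | _, [] => none
  | 0, _ => none
  | fuel + 1, (path, tot) :: rest =>
    if tot = target then some (path.length : Int)
    else
      loopB sets target fuel
        (((sets.filter (fun t => !path.contains t)).map
            (fun t => (path ++ [t], tot + (t.length : Int)))) ++ rest)

def uniao_alt (sets : List (List Int)) : Int :=
  if sets.isEmpty then 0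
  else
    let target : Int := ((uniaoSeen sets).length : Int)
    sets.foldl
      (fun n s =>
        match loopB sets target ((sets.length + 1) ^ sets.length + 1) [([s], (s.length : Int))] with
        | some c => if c < n then c else n
        | none => n)
      (sets.length : Int)

-- ===== PRECONDITION & SPEC =====
def Spec_uniao (sets : List (List Int)) (out : Int) : Prop := out = uniao_alt sets
instance (sets : List (List Int)) (out : Int) : Decidable (Spec_uniao sets out) := by unfold Spec_uniao; infer_instance

-- ===== CLAIM (what is proved, stated in full; the proofs are below) =====
def Claim_equal_uniao : Prop := ∀ (sets : List (List Int)), Dom_uniao sets → Spec_uniao sets (uniao sets)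

-- ===== LEMMAS AND PROOFS =====

-- number of sets (counted with multiplicity in `l`) not yet on the path `p`
def muL (l p : List (List Int)) : Nat := (l.filter (fun t => !p.contains t)).length

-- weight of one DFS node and of a whole stack (fuel bookkeeping for loopB)
def wU (sets p : List (List Int)) : Nat := (sets.length + 1) ^ (muL sets p)
def WU (sets : List (List Int)) (stack : List (List (List Int) × Int)) : Nat :=
  (stack.map (fun e => wU sets e.1)).sum

-- what the stack machine computes, expressed with prox (fuel muL+1 is always enough)
def stackF (sets : List (List Int)) (numeros : List Int) :
    List (List (List Int) × Int) → Option Int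
  | [] => none
  | (p, _) :: rest =>
    match prox sets numeros (muL sets p + 1) p with
    | some r => some ((r.length : Int))
    | none => stackF sets numeros rest

lemma valido_eq (p : List (List Int)) (s : List Int) : valido p s = !p.contains s := by
  induction p with
  | nil => simp [valido]
  | cons a p ih =>
    by_cases h : a = s
    · simp [valido, h, List.contains_cons]
    · have h' : (s == a) = false := by
        simp only [beq_eq_false_iff_ne, ne_eq]
        exact fun e => h e.symm
      simp only [valido, List.contains_cons, h', Bool.false_or, if_neg h, ih]

lemma tamanho_append (p : List (List Int)) (t : List Int) :
    tamanho (p ++ [t]) = tamanho p + (t.length : Int) := by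
  simp [tamanho, List.foldl_append]

lemma filter_len_le {a : Type} (P Q : a → Bool) (h : ∀ x, P x = true → Q x = true) :
    ∀ l : List a, (l.filter P).length ≤ (l.filter Q).length := by
  intro l
  induction l with
  | nil => simp
  | cons x l ih =>
    simp only [List.filter_cons]
    cases hP : P x <;> cases hQ : Q x <;> simp_all <;> omega

lemma filter_len_lt {a : Type} (P Q : a → Bool) (h : ∀ x, P x = true → Q x = true)
    (s : a) : ∀ l : List a, s ∈ l → P s = false → Q s = true →
      (l.filter P).length < (l.filter Q).length := by
  intro l
  induction l with
  | nil => simp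
  | cons x l ih =>
    intro hs hP hQ
    by_cases hxs : x = s
    · subst hxs
      have hle := filter_len_le P Q h l
      simp only [List.filter_cons, hP, hQ, Bool.false_eq_true, if_false, if_true,
        List.length_cons]
      omega
    · have hs' : s ∈ l := by
        rcases List.mem_cons.mp hs with h1 | h1
        · exact absurd h1.symm hxs
        · exact h1
      have hlt := ih hs' hP hQ
      cases hP' : P x <;> cases hQ' : Q x <;>
        simp_all [List.filter_cons] <;> omega

lemma mu_imp (p : List (List Int)) (s : List Int) :
    ∀ x : List Int, (!(p ++ [s]).contains x) = true → (!p.contains x) = true := by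
  intro x hx
  have h1 : x ∉ p ++ [s] := by simpa using hx
  have : x ∉ p := fun hm => h1 (List.mem_append.mpr (Or.inl hm))
  simpa using this

lemma mu_lt (p : List (List Int)) (s : List Int) (l : List (List Int))
    (hs : s ∈ l) (hsp : s ∉ p) : muL l (p ++ [s]) < muL l p := by
  refine filter_len_lt _ _ (mu_imp p s) s l hs ?_ ?_
  · simp
  · simpa using hsp

lemma mu_card (sets p : List (List Int)) : muL sets p ≤ sets.length := by
  simpa [muL] using List.length_filter_le _ sets

lemma go_congr (sets : List (List Int)) (numeros : List Int) :
    ∀ k p, muL sets p ≤ k → ∀ f g, muL sets p ≤ f → muL sets p ≤ g →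
      ∀ restSets, (∀ s ∈ restSets, s ∈ sets) →
        proxGo (prox sets numeros f) p restSets = proxGo (prox sets numeros g) p restSets := by
  intro k
  induction k with
  | zero =>
    intro p hk f g hf hg restSets hsub
    induction restSets with
    | nil => rfl
    | cons s rest ihr =>
      have hv : valido p s = false := by
        rw [valido_eq]
        by_cases hc : s ∈ p
        · simp [List.contains_iff_mem, hc]
        · exfalso
          have : s ∈ sets.filter (fun t => !p.contains t) := by
            simp [List.mem_filter, List.contains_iff_mem, hc, hsub s (by simp)]
          have hpos : 0 < (List.filter (fun t => !p.contains t) sets).length :=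
            List.length_pos_of_mem this
          have : 0 < muL sets p := hpos
          omega
      simp only [proxGo, hv, Bool.false_eq_true, if_false]
      exact ihr (fun x hx => hsub x (List.mem_cons_of_mem _ hx))
  | succ k ihk =>
    intro p hk f g hf hg restSets hsub
    induction restSets with
    | nil => rfl
    | cons s rest ihr =>
      have ihr' := ihr (fun x hx => hsub x (List.mem_cons_of_mem _ hx))
      by_cases hv : valido p s = true
      · have hsp : s ∉ p := by
          rw [valido_eq] at hv; simpa [List.contains_iff_mem] using hv
        have hlt : muL sets (p ++ [s]) < muL sets p := mu_lt p s sets (hsub s (by simp)) hsp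
        have hμpos : 1 ≤ muL sets p := by omega
        obtain ⟨f', rfl⟩ : ∃ f', f = f' + 1 := ⟨f - 1, by omega⟩
        obtain ⟨g', rfl⟩ : ∃ g', g = g' + 1 := ⟨g - 1, by omega⟩
        have hrec : prox sets numeros (f' + 1) (p ++ [s]) = prox sets numeros (g' + 1) (p ++ [s]) := by
          simp only [prox]
          split
          · rfl
          · exact ihk (p ++ [s]) (by omega) f' g' (by omega) (by omega) sets (fun x hx => hx)
        simp only [proxGo, hv, if_true, hrec]
        cases prox sets numeros (g' + 1) (p ++ [s]) with
        | some r => rfl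
        | none => simpa using ihr'
      · simp only [proxGo, hv, Bool.false_eq_true, if_false]
        exact ihr'

lemma prox_congr (sets : List (List Int)) (numeros : List Int) (p : List (List Int))
    (f g : Nat) (hf : muL sets p + 1 ≤ f) (hg : muL sets p + 1 ≤ g) :
    prox sets numeros f p = prox sets numeros g p := by
  obtain ⟨f', rfl⟩ : ∃ f', f = f' + 1 := ⟨f - 1, by omega⟩
  obtain ⟨g', rfl⟩ : ∃ g', g = g' + 1 := ⟨g - 1, by omega⟩
  simp only [prox]
  split
  · rfl
  · exact go_congr sets numeros (muL sets p) p le_rfl f' g' (by omega) (by omega) sets (fun x hx => hx)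

lemma wu_pos (sets p : List (List Int)) : 1 ≤ wU sets p :=
  Nat.one_le_pow _ _ (by omega)

lemma sum_bound (sets p : List (List Int)) (tot : Int) (m : Nat) :
    ∀ L : List (List Int), (∀ t ∈ L, muL sets (p ++ [t]) ≤ m) →
      WU sets (L.map (fun t => (p ++ [t], tot + (t.length : Int))))
        ≤ L.length * (sets.length + 1) ^ m := by
  intro L
  induction L with
  | nil => simp [WU]
  | cons t L ih =>
    intro h
    have h1 : muL sets (p ++ [t]) ≤ m := h t (by simp)
    have h2 := ih (fun x hx => h x (List.mem_cons_of_mem _ hx))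
    have h3 : wU sets (p ++ [t]) ≤ (sets.length + 1) ^ m :=
      Nat.pow_le_pow_right (by omega) h1
    have hring : (L.length + 1) * (sets.length + 1) ^ m
        = L.length * (sets.length + 1) ^ m + (sets.length + 1) ^ m := by ring
    simp only [WU, List.map_cons, List.sum_cons, List.length_cons] at *
    omega

lemma W_children (sets : List (List Int)) (p : List (List Int)) (tot : Int) :
    WU sets ((sets.filter (fun t => !p.contains t)).map
      (fun t => (p ++ [t], tot + (t.length : Int)))) + 1 ≤ wU sets p := by
  have hcard : (sets.filter (fun t => !p.contains t)).length = muL sets p := rfl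
  rcases hm : muL sets p with _ | m
  · have hnil : sets.filter (fun t => !p.contains t) = [] := by
      rw [← List.length_eq_zero_iff]; omega
    rw [hnil]
    simp only [WU, List.map_nil, List.sum_nil, wU, hm, pow_zero]
    omega
  · have hL : ∀ t ∈ sets.filter (fun t => !p.contains t), muL sets (p ++ [t]) ≤ m := by
      intro t ht
      have htsets : t ∈ sets := (List.mem_filter.mp ht).1
      have htp : t ∉ p := by
        have := (List.mem_filter.mp ht).2
        simpa using this
      have := mu_lt p t sets htsets htp
      omega
    have hsum := sum_bound sets p tot m _ hL
    rw [hcard, hm] at hsum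
    have hS : m + 1 ≤ sets.length := hm ▸ mu_card sets p
    have hpow : 1 ≤ (sets.length + 1) ^ m := Nat.one_le_pow _ _ (by omega)
    have hmul : (m + 1) * (sets.length + 1) ^ m ≤ sets.length * (sets.length + 1) ^ m :=
      Nat.mul_le_mul_right _ hS
    have hw : wU sets p = sets.length * (sets.length + 1) ^ m + (sets.length + 1) ^ m := by
      simp only [wU, hm, pow_succ]
      ring
    omega

lemma stackF_children (sets : List (List Int)) (numeros : List Int) (f : Nat) :
    ∀ restSets p (tot : Int) rest, (∀ s ∈ restSets, s ∈ sets) → muL sets p ≤ f →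
      stackF sets numeros
          (((restSets.filter (fun t => !p.contains t)).map
              (fun t => (p ++ [t], tot + (t.length : Int)))) ++ rest)
        = match proxGo (prox sets numeros f) p restSets with
          | some r => some ((r.length : Int))
          | none => stackF sets numeros rest := by
  intro restSets
  induction restSets with
  | nil => intro p tot rest _ _; rfl
  | cons s restSets ih =>
    intro p tot rest hsub hf
    have hsub' : ∀ x ∈ restSets, x ∈ sets := fun x hx => hsub x (List.mem_cons_of_mem _ hx)
    by_cases hv : valido p s = true
    · have hsp : s ∉ p := by
        rw [valido_eq] at hv; simpa [List.contains_iff_mem] using hv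
      have hcontains : (!p.contains s) = true := by
        simpa [List.contains_iff_mem] using hsp
      have hlt : muL sets (p ++ [s]) < muL sets p := mu_lt p s sets (hsub s (by simp)) hsp
      have hprox : prox sets numeros (muL sets (p ++ [s]) + 1) (p ++ [s])
          = prox sets numeros f (p ++ [s]) :=
        prox_congr sets numeros (p ++ [s]) _ f le_rfl (by omega)
      simp only [List.filter_cons, hcontains, if_true, List.map_cons, List.cons_append,
        stackF, proxGo, hv, hprox]
      cases prox sets numeros f (p ++ [s]) with
      | some r => rfl
      | none => exact ih p tot rest hsub' hf
    · have hv' : valido p s = false := by revert hv; cases valido p s <;> simp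
      have hcontains : (!p.contains s) = false := by
        rw [valido_eq] at hv'; exact hv'
      simp only [List.filter_cons, hcontains, Bool.false_eq_true, if_false, proxGo, hv']
      exact ih p tot rest hsub' hf

lemma bridge (sets : List (List Int)) (numeros : List Int) :
    ∀ fb stack, (∀ e ∈ stack, e.2 = tamanho e.1) → WU sets stack ≤ fb →
      loopB sets (numeros.length : Int) fb stack = stackF sets numeros stack := by
  intro fb
  induction fb using Nat.strong_induction_on with
  | _ fb IH =>
    intro stack hinv hW
    cases stack with
    | nil => cases fb <;> rfl
    | cons e rest =>
      obtain ⟨p, t⟩ := e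
      have ht : t = tamanho p := hinv (p, t) (by simp)
      have hwp : 1 ≤ wU sets p := wu_pos sets p
      have hWr : wU sets p + WU sets rest ≤ fb := by
        simpa [WU] using hW
      obtain ⟨fb', rfl⟩ : ∃ fb', fb = fb' + 1 := ⟨fb - 1, by omega⟩
      by_cases hT : t = (numeros.length : Int)
      · have : tamanho p = (numeros.length : Int) := by omega
        simp only [loopB, hT, if_true, stackF, prox, this]
      · have hTf : tamanho p ≠ (numeros.length : Int) := by omega
        have hinv' : ∀ e ∈ ((sets.filter (fun t => !p.contains t)).map
            (fun t' => (p ++ [t'], t + (t'.length : Int)))) ++ rest, e.2 = tamanho e.1 := by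
          intro e he
          rcases List.mem_append.mp he with h | h
          · simp only [List.mem_map] at h
            obtain ⟨t', _, rfl⟩ := h
            simp [tamanho_append, ht]
          · exact hinv e (List.mem_cons_of_mem _ h)
        have hWc := W_children sets p t
        have hW' : WU sets (((sets.filter (fun t => !p.contains t)).map
            (fun t' => (p ++ [t'], t + (t'.length : Int)))) ++ rest) ≤ fb' := by
          simp only [WU, List.map_append, List.sum_append] at *
          omega
        simp only [loopB, hT, if_false]
        rw [IH fb' (by omega) _ hinv' hW']
        rw [stackF_children sets numeros (muL sets p) sets p t rest (fun x hx => hx) le_rfl]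
        simp only [stackF, prox, hTf, if_false]
      
theorem uniao_eq_alt (sets : List (List Int)) : uniao sets = uniao_alt sets := by
  cases hsets : sets with
  | nil => rfl
  | cons s0 rest0 =>
    rw [← hsets]
    have hne : sets.length ≠ 0 := by rw [hsets]; simp
    have hie : sets.isEmpty = false := by rw [hsets]; rfl
    have hseen : uniaoSeen sets = uniaoNums sets := by
      unfold uniaoSeen uniaoNums
      apply PySem.List.foldl_congr_mem
      intro acc x _
      rw [PySem.Set.update]
      apply PySem.List.foldl_congr_mem
      intro acc' d _
      rw [PySem.Set.add]
      by_cases h : d ∈ acc' <;> simp [PySem.Set.contains, List.contains_iff_mem, h]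
    unfold uniao uniao_alt
    simp only [hne, if_false, hie, Bool.false_eq_true]
    rw [hseen]
    apply PySem.List.foldl_congr_mem
    intro n s hs
    have hbridge := bridge sets (uniaoNums sets) ((sets.length + 1) ^ sets.length + 1)
      [([s], (s.length : Int))]
      (by intro e he; simp at he; subst he; simp [tamanho])
      (by
        have h1 : muL sets [s] ≤ sets.length := mu_card sets [s]
        have : wU sets [s] ≤ (sets.length + 1) ^ sets.length :=
          Nat.pow_le_pow_right (by omega) h1
        simp only [WU, List.map_cons, List.map_nil, List.sum_cons, List.sum_nil]
        omega)
    rw [hbridge]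
    have hfuel : prox sets (uniaoNums sets) (sets.length + 1) [s]
        = prox sets (uniaoNums sets) (muL sets [s] + 1) [s] :=
      prox_congr sets (uniaoNums sets) [s] _ _ (by have := mu_card sets [s]; omega) le_rfl
    rw [hfuel]
    simp only [stackF]
    cases prox sets (uniaoNums sets) (muL sets [s] + 1) [s] with
    | some r => rfl
    | none => rfl

-- ===== VERDICT (by name: the statement is the Claim_ definition above) =====
theorem uniao_spec : Claim_equal_uniao := by
  intro sets _
  unfold Spec_uniao
  exact uniao_eq_alt sets
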